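-- pv_equiv track=rewrite | github.com/MdAbedin/binarysearch | 1001 - 1100/1029 Log Truncation.py | solve
-- ===== SOURCE A (Python) =====
-- def solve(logs, limit):
--     l,r = 0,min(limit, max(logs))
--     ans = 0
--
--     while l <= r:
--         mid = (l+r)//2
--
--         if sum(min(x,mid) for x in logs) <= limit:
--             ans = mid
--             l = mid+1
--         else:
--             r = mid-1
--
--     return ans
-- ===== SOURCE B (Python) =====
-- def solve(logs, limit):
--     # sort once, then one pass over breakpoints with a running prefix sum;
--     # in each segment the truncated sum is linear in the cap, so the best cap
--     # there is a single floor division.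
--     s = sorted(logs)
--     n = len(s)
--     r = min(limit, s[-1])
--     best = 0
--     pre = 0      # sum of the elements already passed (all <= any cap in the segment)
--     prev = 0     # lower end of the current cap segment
--     for i, x in enumerate(s):
--         hi = min(x - 1, r)
--         if prev <= hi:
--             c = (limit - pre) // (n - i)
--             if c >= prev:
--                 best = max(best, min(c, hi))
--         pre += x
--         prev = max(x, 0)
--     if prev <= r and pre <= limit:
--         best = max(best, r)
--     return best
-- ===== Notes on version B (the rewrite author's own statement) =====
-- stated objective: faster
-- what changed: Replaced A's binary search over the cap range (each probe re-sums min(x,mid) over all logs) by sorting the logs once and doing a single prefix-sum pass: within each segment between consecutive sorted values the truncated sum is linear in the cap, so the best cap there is one floor division.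
import Mathlib
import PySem

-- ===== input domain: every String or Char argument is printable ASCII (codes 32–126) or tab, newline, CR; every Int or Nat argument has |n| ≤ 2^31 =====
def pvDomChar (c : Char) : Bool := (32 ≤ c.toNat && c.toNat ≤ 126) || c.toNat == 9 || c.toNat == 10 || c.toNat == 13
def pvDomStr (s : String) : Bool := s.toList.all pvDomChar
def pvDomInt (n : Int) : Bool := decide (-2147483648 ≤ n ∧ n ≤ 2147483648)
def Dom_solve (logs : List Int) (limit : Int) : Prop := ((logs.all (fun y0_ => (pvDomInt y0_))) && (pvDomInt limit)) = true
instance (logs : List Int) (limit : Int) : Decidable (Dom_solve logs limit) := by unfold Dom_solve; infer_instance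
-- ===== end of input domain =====

-- B replaces A's binary search over the cap range (a full pass over logs per probe)
-- by one sort plus a single prefix-sum pass whose best cap per segment is a floor division.

-- ===== PORT A =====
-- sum(min(x, mid) for x in logs)
def solveSum (logs : List Int) (mid : Int) : Int := (logs.map (fun x => min x mid)).sum

-- the while-loop of A, state (l, r, ans)
def solveLoop (logs : List Int) (limit l r ans : Int) : Int :=
  if h : l ≤ r then
    let mid := PySem.Int.floordiv (l + r) 2
    if solveSum logs mid ≤ limit then
      solveLoop logs limit (mid + 1) r mid
    else
      solveLoop logs limit l (mid - 1) ans
  else ans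
termination_by (r + 1 - l).toNat
decreasing_by
  · have := PySem.Int.floordiv_two_mid_bounds h
    omega
  · have := PySem.Int.floordiv_two_mid_bounds h
    omega

def solve (logs : List Int) (limit : Int) : Int :=
  match PySem.List.max? logs (fun x => x) with
  | none => 0   -- Python's max([]) raises ValueError; excluded by Pre_solve
  | some m => solveLoop logs limit 0 (min limit m) 0

-- ===== PORT B =====
-- the for-loop of B over the sorted list, state (k = n - i, pre, prev, best),
-- followed by B's final 'if prev <= r and pre <= limit' step
def altLoop (limit r : Int) (xs : List Int) (k pre prev best : Int) : Int :=
  match xs with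
  | [] => if prev ≤ r ∧ pre ≤ limit then max best r else best
  | x :: rest =>
      let hi := min (x - 1) r
      let best' :=
        if prev ≤ hi then
          let c := PySem.Int.floordiv (limit - pre) k
          if prev ≤ c then max best (min c hi) else best
        else best
      altLoop limit r rest (k - 1) (pre + x) (max x 0) best'

def solve_alt (logs : List Int) (limit : Int) : Int :=
  let s := PySem.List.sorted logs (fun x => x)
  match s.getLast? with
  | none => 0   -- Python's s[-1] raises IndexError; excluded by Pre_solve
  | some last => altLoop limit (min limit last) s (s.length : Int) 0 0 0

-- ===== PRECONDITION & SPEC =====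
-- Python A raises ValueError (max of empty sequence) on logs = []; B raises IndexError there.
def Pre_solve (logs : List Int) (limit : Int) : Prop := logs ≠ []
instance (logs : List Int) (limit : Int) : Decidable (Pre_solve logs limit) := by
  unfold Pre_solve; infer_instance

def pvWitness_solve : List Int × Int := ([3, 1, 2], 4)

def Spec_solve (logs : List Int) (limit : Int) (out : Int) : Prop := out = solve_alt logs limit
instance (logs : List Int) (limit : Int) (out : Int) : Decidable (Spec_solve logs limit out) := by
  unfold Spec_solve; infer_instance

-- ===== CLAIM (what is proved, stated in full; the proofs are below) =====
def Claim_equal_solve : Prop := ∀ (logs : List Int) (limit : Int), Dom_solve logs limit → Pre_solve logs limit → Spec_solve logs limit (solve logs limit)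

-- ===== LEMMAS AND PROOFS =====

-- both ports compute the unique b with this property (F = truncated-sum function):
-- b is 0 or a feasible cap ≤ r, and every cap in (b, r] is infeasible
def GoodCap (F : Int → Int) (limit r b : Int) : Prop :=
  0 ≤ b ∧ (b = 0 ∨ (b ≤ r ∧ F b ≤ limit)) ∧ ∀ c, b < c → c ≤ r → limit < F c

theorem goodCap_unique {F : Int → Int} {limit r b₁ b₂ : Int}
    (h₁ : GoodCap F limit r b₁) (h₂ : GoodCap F limit r b₂) : b₁ = b₂ := by
  obtain ⟨h10, h1f, h1a⟩ := h₁
  obtain ⟨h20, h2f, h2a⟩ := h₂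
  rcases lt_trichotomy b₁ b₂ with h | h | h
  · rcases h2f with rfl | ⟨hle, hfe⟩
    · omega
    · exact absurd hfe (by have := h1a b₂ h hle; omega)
  · exact h
  · rcases h1f with rfl | ⟨hle, hfe⟩
    · omega
    · exact absurd hfe (by have := h2a b₁ h hle; omega)

theorem solveSum_mono {logs : List Int} {a b : Int} (h : a ≤ b) :
    solveSum logs a ≤ solveSum logs b := by
  induction logs with
  | nil => simp [solveSum]
  | cons x t ih =>
      simp only [solveSum, List.map_cons, List.sum_cons] at *
      have : min x a ≤ min x b := by omega
      omega

-- A's loop finds the greatest feasible cap in [l, r] (or returns ans if none)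
theorem solveLoop_good (logs : List Int) (limit : Int) :
    ∀ (n : Nat) (l r ans : Int), (r + 1 - l).toNat ≤ n →
      (solveLoop logs limit l r ans = ans ∧ ∀ c, l ≤ c → c ≤ r → limit < solveSum logs c) ∨
      (l ≤ solveLoop logs limit l r ans ∧ solveLoop logs limit l r ans ≤ r ∧
        solveSum logs (solveLoop logs limit l r ans) ≤ limit ∧
        ∀ c, solveLoop logs limit l r ans < c → c ≤ r → limit < solveSum logs c) := by
  intro n
  induction n with
  | zero =>
    intro l r ans hle
    have hlr : ¬ l ≤ r := by omega
    rw [solveLoop]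
    rw [dif_neg hlr]
    exact Or.inl ⟨rfl, fun c h1 h2 => by omega⟩
  | succ n ih =>
    intro l r ans hle
    rw [solveLoop]
    by_cases hlr : l ≤ r
    · have hmid := PySem.Int.floordiv_two_mid_bounds hlr
      rw [dif_pos hlr]
      by_cases hf : solveSum logs (PySem.Int.floordiv (l + r) 2) ≤ limit
      · simp only [hf, if_true]
        rcases ih (PySem.Int.floordiv (l + r) 2 + 1) r (PySem.Int.floordiv (l + r) 2)
            (by omega) with ⟨heq, hall⟩ | ⟨h1, h2, h3, h4⟩
        · rw [heq]
          exact Or.inr ⟨hmid.1, hmid.2, hf, hall⟩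
        · exact Or.inr ⟨by omega, h2, h3, h4⟩
      · simp only [hf, if_false]
        have hup : ∀ c, PySem.Int.floordiv (l + r) 2 ≤ c → limit < solveSum logs c :=
          fun c hc => lt_of_lt_of_le (lt_of_not_ge hf) (solveSum_mono hc)
        rcases ih l (PySem.Int.floordiv (l + r) 2 - 1) ans (by omega) with
            ⟨heq, hall⟩ | ⟨h1, h2, h3, h4⟩
        · refine Or.inl ⟨heq, fun c hc1 hc2 => ?_⟩
          by_cases h : c ≤ PySem.Int.floordiv (l + r) 2 - 1
          · exact hall c hc1 h
          · exact hup c (by omega)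
        · refine Or.inr ⟨h1, by omega, h3, fun c hc1 hc2 => ?_⟩
          by_cases h : c ≤ PySem.Int.floordiv (l + r) 2 - 1
          · exact h4 c hc1 h
          · exact hup c (by omega)
    · rw [dif_neg hlr]
      exact Or.inl ⟨rfl, fun c h1 h2 => absurd (le_trans h1 h2) hlr⟩

theorem sum_map_min_const : ∀ (l : List Int) (c : Int), (∀ y ∈ l, c ≤ y) →
    (l.map (fun y => min y c)).sum = (l.length : Int) * c := by
  intro l c
  induction l with
  | nil => simp
  | cons x t ih =>
      intro h
      have hx : min x c = c := by have := h x (by simp); omega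
      have ht := ih (fun y hy => h y (by simp [hy]))
      simp only [List.map_cons, List.sum_cons, List.length_cons, hx, ht]
      push_cast
      ring

theorem pairwise_le_getLast : ∀ (l : List Int) (h : l ≠ []),
    l.Pairwise (· ≤ ·) → ∀ y ∈ l, y ≤ l.getLast h := by
  intro l
  induction l with
  | nil => intro h; exact absurd rfl h
  | cons x t ih =>
      intro h hp y hy
      rcases List.pairwise_cons.1 hp with ⟨hx, ht⟩
      cases t with
      | nil => simp at hy; simp [hy, List.getLast]
      | cons z u =>
          rw [List.getLast_cons (by simp)]
          rcases List.mem_cons.1 hy with rfl | hy'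
          · exact le_trans (hx _ (List.getLast_mem _)) (le_refl _)
          · exact ih (by simp) ht y hy'

-- B's loop maintains: best is the greatest feasible cap among the segments seen so far
theorem altLoop_good (F : Int → Int) (limit r : Int) :
    ∀ (xs : List Int) (pre prev best : Int),
      xs.Pairwise (· ≤ ·) →
      (∀ x ∈ xs, prev ≤ max x 0) →
      0 ≤ prev →
      (∀ c, prev ≤ c → F c = pre + (xs.map (fun y => min y c)).sum) →
      0 ≤ best → best ≤ max r 0 →
      (best = 0 ∨ (best ≤ r ∧ F best ≤ limit)) →
      (∀ c, best < c → c ≤ r → c < prev → limit < F c) →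
      GoodCap F limit r (altLoop limit r xs (xs.length : Int) pre prev best) := by
  intro xs
  induction xs with
  | nil =>
      intro pre prev best _ _ hprev0 hF hb0 hbr hbfeas hbtail
      rw [altLoop]
      by_cases hcond : prev ≤ r ∧ pre ≤ limit
      · rw [if_pos hcond]
        have hr0 : 0 ≤ r := le_trans hprev0 hcond.1
        have hFr : F r = pre := by
          have := hF r hcond.1; simpa using this
        have hmax : max best r = r := by omega
        rw [hmax]
        exact ⟨hr0, Or.inr ⟨le_refl r, by omega⟩, fun c h1 h2 => by omega⟩
      · rw [if_neg hcond]
        refine ⟨hb0, hbfeas, fun c h1 h2 => ?_⟩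
        by_cases hcp : c < prev
        · exact hbtail c h1 h2 hcp
        · have hFc : F c = pre := by have := hF c (by omega); simpa using this
          have : ¬ pre ≤ limit := fun hple => hcond ⟨le_trans (by omega) h2, hple⟩
          omega
  | cons x rest ih =>
      intro pre prev best hsort hord hprev0 hF hb0 hbr hbfeas hbtail
      rcases List.pairwise_cons.1 hsort with ⟨hxrest, hsort'⟩
      have hprevx : prev ≤ max x 0 := hord x (by simp)
      have hn1 : (0:Int) < ((x :: rest).length : Int) := by
        simp only [List.length_cons]; push_cast; omega
      -- feasibility bracket on the segment [prev, min (x-1) r]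
      have hseg : ∀ c, prev ≤ c → c < x →
          F c = pre + ((x :: rest).length : Int) * c := by
        intro c hc1 hc2
        have h1 := hF c hc1
        have h2 : ((x :: rest).map (fun y => min y c)).sum
            = ((x :: rest).length : Int) * c := by
          refine sum_map_min_const _ _ ?_
          intro y hy
          rcases List.mem_cons.1 hy with rfl | hy'
          · omega
          · have := hxrest y hy'; omega
        omega
      have hbracket : ∀ c, prev ≤ c → c < x → (F c ≤ limit ↔
          c ≤ PySem.Int.floordiv (limit - pre) ((x :: rest).length : Int)) := by
        intro c hc1 hc2
        rw [PySem.Int.le_floordiv_iff_mul_le hn1, hseg c hc1 hc2]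
        constructor <;> intro h <;> nlinarith
      rw [altLoop]
      simp only []
      -- the new state
      have hklen : ((x :: rest).length : Int) - 1 = (rest.length : Int) := by
        simp only [List.length_cons]; push_cast; omega
      rw [hklen]
      set c0 := PySem.Int.floordiv (limit - pre) ((x :: rest).length : Int) with hc0
      set best' := if prev ≤ min (x - 1) r then
          if prev ≤ c0 then max best (min c0 (min (x - 1) r)) else best
        else best with hbest'
      have hb'ge : best ≤ best' := by
        rw [hbest']; split_ifs <;> omega
      have hb'0 : 0 ≤ best' := le_trans hb0 hb'ge
      have hb'r : best' ≤ max r 0 := by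
        rw [hbest']; split_ifs with h1 h2 <;> omega
      have hb'feas : best' = 0 ∨ (best' ≤ r ∧ F best' ≤ limit) := by
        rw [hbest']
        split_ifs with h1 h2
        · by_cases hm : best ≤ min c0 (min (x - 1) r)
          · rw [max_eq_right hm]
            refine Or.inr ⟨by omega, ?_⟩
            have hin1 : prev ≤ min c0 (min (x - 1) r) := by omega
            have hin2 : min c0 (min (x - 1) r) < x := by omega
            exact (hbracket _ hin1 hin2).2 (by omega)
          · rw [max_eq_left (by omega)]; exact hbfeas
        · exact hbfeas
        · exact hbfeas
      have hb'tail : ∀ c, best' < c → c ≤ r → c < max x 0 → limit < F c := by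
        intro c h1 h2 h3
        by_cases hcp : c < prev
        · exact hbtail c (by omega) h2 hcp
        · have hc1 : prev ≤ c := by omega
          have hcx : c < x := by omega
          have hchi : c ≤ min (x - 1) r := by omega
          have hph : prev ≤ min (x - 1) r := by omega
          have hgt : c0 < c := by
            rw [hbest'] at h1
            simp only [hph, if_true] at h1
            by_cases h2' : prev ≤ c0
            · simp only [h2', if_true] at h1; omega
            · omega
          have := (hbracket c hc1 hcx)
          omega
      have hF' : ∀ c, max x 0 ≤ c → F c = (pre + x) + (rest.map (fun y => min y c)).sum := by
        intro c hc
        have h1 := hF c (by omega)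
        have hx : min x c = x := by omega
        simp only [List.map_cons, List.sum_cons, hx] at h1
        omega
      have hord' : ∀ y ∈ rest, max x 0 ≤ max y 0 := by
        intro y hy; have := hxrest y hy; omega
      exact ih (pre + x) (max x 0) best' hsort' hord' (by omega) hF' hb'0 hb'r hb'feas hb'tail

-- ===== VERDICT (by name: the statement is the Claim_ definition above) =====
theorem solve_spec : Claim_equal_solve := by
  intro logs limit _ hpre
  unfold Spec_solve
  obtain ⟨M, hM⟩ : ∃ m, PySem.List.max? logs (fun x => x) = some m := by
    cases h : PySem.List.max? logs (fun x => x) with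
    | none => exact absurd ((PySem.List.max?_eq_none_iff _ _).1 h) hpre
    | some m => exact ⟨m, rfl⟩
  have hsne : PySem.List.sorted logs (fun x => x) ≠ [] := by
    intro h; exact hpre ((PySem.List.sorted_eq_nil_iff _ _ _).1 h)
  have hL : (PySem.List.sorted logs (fun x => x)).getLast? =
      some ((PySem.List.sorted logs (fun x => x)).getLast hsne) :=
    List.getLast?_eq_some_getLast hsne
  set L := (PySem.List.sorted logs (fun x => x)).getLast hsne with hLdef
  have hperm := PySem.List.sorted_perm logs (fun x => x) false
  have hML : M = L := by
    have h1 : M ≤ L := by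
      refine pairwise_le_getLast _ hsne ?_ M ?_
      · exact PySem.List.sorted_pairwise logs (fun x => x)
      · exact (PySem.List.mem_sorted logs (fun x => x) false M).2 (PySem.List.max?_mem hM)
    have h2 : L ≤ M := by
      refine PySem.List.max?_isMax hM L ?_
      exact hperm.mem_iff.1 (List.getLast_mem hsne)
    omega
  have hsum : ∀ c : Int, solveSum logs c =
      0 + ((PySem.List.sorted logs (fun x => x)).map (fun y => min y c)).sum := by
    intro c
    rw [zero_add]
    exact ((hperm.map (fun y => min y c)).sum_eq).symm
  have hgoodB : GoodCap (solveSum logs) limit (min limit M) (solve_alt logs limit) := by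
    rw [hML]
    unfold solve_alt
    simp only [hL]
    show GoodCap (solveSum logs) limit (min limit L)
      (altLoop limit (min limit L) (PySem.List.sorted logs (fun x => x))
        ((PySem.List.sorted logs (fun x => x)).length : Int) 0 0 0)
    refine altLoop_good (solveSum logs) limit (min limit L) _ 0 0 0
      (PySem.List.sorted_pairwise logs (fun x => x))
      (fun x _ => by omega) (le_refl 0) (fun c _ => hsum c) (le_refl 0)
      (by omega) (Or.inl rfl) (fun c h1 h2 h3 => by omega)
  have hgoodA : GoodCap (solveSum logs) limit (min limit M) (solve logs limit) := by
    unfold solve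
    rw [hM]
    show GoodCap (solveSum logs) limit (min limit M) (solveLoop logs limit 0 (min limit M) 0)
    rcases solveLoop_good logs limit (min limit M + 1).toNat 0 (min limit M) 0
        (by omega) with ⟨heq, hall⟩ | ⟨h1, h2, h3, h4⟩
    · rw [heq]
      exact ⟨le_refl 0, Or.inl rfl, fun c hc1 hc2 => hall c (by omega) hc2⟩
    · exact ⟨h1, Or.inr ⟨h2, h3⟩, h4⟩
  exact goodCap_unique hgoodA hgoodB
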